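-- pv_equiv track=rewrite | github.com/josejoby/programming_questions | python/array_prefixsum_of_even_indices.py | prefix_array_of_even_indices
-- ===== SOURCE A (Python) =====
-- def prefix_array_of_even_indices(A):
--     p=[A[0]] # 0 is considered as even index for this problem
--     for i in range(1, len(A)):
--         if i&1: # if i is odd, add previous prefix value
--             p.append(p[i-1])
--         else: # if i is even, compute new prefix value.
--             p.append(p[i-1] + A[i])
--     return p
-- ===== SOURCE B (Python) =====
-- def prefix_array_of_even_indices(A):
--     # Build a masked copy (odd indices contribute 0), then one plain running sum.
--     masked = [A[0]] + [A[i] if i % 2 == 0 else 0 for i in range(1, len(A))]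
--     prefix = []
--     total = 0
--     for v in masked:
--         total += v
--         prefix.append(total)
--     return prefix
-- ===== Notes on version B (the rewrite author's own statement) =====
-- stated objective: idiomatic
-- what changed: Replaces A's parity-branching loop that indexes back into the growing result list with a build-then-reduce decomposition: first a masked copy of the array (odd indices zeroed), then a single plain running-sum pass with no indexing into the output.
import Mathlib
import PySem

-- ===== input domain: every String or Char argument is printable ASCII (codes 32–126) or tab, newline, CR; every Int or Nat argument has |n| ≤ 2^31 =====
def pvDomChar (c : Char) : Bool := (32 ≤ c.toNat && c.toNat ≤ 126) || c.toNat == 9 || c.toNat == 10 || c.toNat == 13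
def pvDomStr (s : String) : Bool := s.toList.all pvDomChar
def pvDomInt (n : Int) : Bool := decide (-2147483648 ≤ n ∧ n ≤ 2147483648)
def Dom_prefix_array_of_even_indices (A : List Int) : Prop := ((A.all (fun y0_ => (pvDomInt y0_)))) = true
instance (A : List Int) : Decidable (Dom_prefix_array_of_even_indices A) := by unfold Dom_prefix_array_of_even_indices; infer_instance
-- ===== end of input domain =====

-- B replaces A's parity-branching loop indexing into the result list by a two-pass
-- build-masked-array-then-running-sum decomposition (idiomatic; same O(n) cost).


-- ===== PORT A =====
-- `i&1` is ported as `PySem.Int.mod i 2 == 1`, exact for the nonnegative loop index i.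
def prefix_array_of_even_indices (A : List Int) : List Int :=
  (PySem.List.pyRange 1 (A.length : Int) 1).foldl
    (fun p i =>
      if PySem.Int.mod i 2 == 1 then
        p ++ [PySem.List.pyGetD p (i - 1) 0]
      else
        p ++ [PySem.List.pyGetD p (i - 1) 0 + PySem.List.pyGetD A i 0])
    [PySem.List.pyGetD A 0 0]

-- ===== PORT B =====
def prefix_array_of_even_indices_alt (A : List Int) : List Int :=
  let masked : List Int :=
    [PySem.List.pyGetD A 0 0] ++
      (PySem.List.pyRange 1 (A.length : Int) 1).map
        (fun i => if PySem.Int.mod i 2 == 0 then PySem.List.pyGetD A i 0 else 0)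
  (masked.foldl (fun (st : Int × List Int) v => (st.1 + v, st.2 ++ [st.1 + v]))
    ((0 : Int), ([] : List Int))).2

-- ===== PRECONDITION & SPEC =====
-- Pre_ excludes only the empty list, on which the Python A (and B) raise IndexError at the initial element access.
def Pre_prefix_array_of_even_indices (A : List Int) : Prop := A ≠ []
instance (A : List Int) : Decidable (Pre_prefix_array_of_even_indices A) := by
  unfold Pre_prefix_array_of_even_indices; infer_instance

def pvWitness_prefix_array_of_even_indices : List Int := [3, -1, 4, 1, 5]

def Spec_prefix_array_of_even_indices (A : List Int) (out : List Int) : Prop :=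
  out = prefix_array_of_even_indices_alt A
instance (A : List Int) (out : List Int) : Decidable (Spec_prefix_array_of_even_indices A out) := by
  unfold Spec_prefix_array_of_even_indices; infer_instance

-- ===== CLAIM (what is proved, stated in full; the proofs are below) =====
def Claim_equal_prefix_array_of_even_indices : Prop :=
  ∀ (A : List Int), Dom_prefix_array_of_even_indices A →
    Pre_prefix_array_of_even_indices A →
    Spec_prefix_array_of_even_indices A (prefix_array_of_even_indices A)

-- ===== LEMMAS AND PROOFS =====

/-- Running sums of a list starting from accumulator `t`. -/
def runsum : Int → List Int → List Int
  | _, [] => []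
  | t, v :: vs => (t + v) :: runsum (t + v) vs

/-- The masked list B builds. -/
def maskedOf (A : List Int) : List Int :=
  [PySem.List.pyGetD A 0 0] ++
    (PySem.List.pyRange 1 (A.length : Int) 1).map
      (fun i => if PySem.Int.mod i 2 == 0 then PySem.List.pyGetD A i 0 else 0)

theorem foldl_pair (l : List Int) (t : Int) (acc : List Int) :
    (l.foldl (fun (st : Int × List Int) v => (st.1 + v, st.2 ++ [st.1 + v])) (t, acc)).2
      = acc ++ runsum t l := by
  induction l generalizing t acc with
  | nil => simp [runsum]
  | cons v vs ih => simp [runsum, ih]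

theorem alt_eq_runsum (A : List Int) :
    prefix_array_of_even_indices_alt A = runsum 0 (maskedOf A) := by
  simp [prefix_array_of_even_indices_alt, maskedOf, foldl_pair, runsum]

theorem runsum_snoc (l : List Int) (t v : Int) :
    runsum t (l ++ [v]) = runsum t l ++ [t + l.sum + v] := by
  induction l generalizing t with
  | nil => simp [runsum]
  | cons x xs ih => simp [runsum, ih]; ring

theorem runsum_getD_last (l : List Int) (t : Int) (k : Nat) (h : l.length = k + 1) :
    (runsum t l).getD k 0 = t + l.sum := by
  induction l generalizing t k with
  | nil => simp at h
  | cons v vs ih =>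
    cases vs with
    | nil =>
      have hk : k = 0 := by simpa using h.symm
      subst hk; simp [runsum]
    | cons w ws =>
      have hk : k = (w :: ws).length := by simpa using h.symm
      cases k with
      | zero => simp at hk
      | succ k' =>
        have h' : (w :: ws).length = k' + 1 := by omega
        have := ih (t + v) k' h'
        simp [runsum] at this ⊢
        rw [this]; ring

theorem length_maskedOf (A : List Int) (h : A ≠ []) :
    (maskedOf A).length = A.length := by
  have hn : 1 ≤ A.length := List.length_pos_iff.mpr h
  simp [maskedOf, PySem.List.length_pyRange_one]
  omega

theorem loop_inv (A : List Int) (h : A ≠ []) (k : Nat) (hk : k < A.length) :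
    (PySem.List.pyRange 1 ((k : Int) + 1) 1).foldl
      (fun p i =>
        if PySem.Int.mod i 2 == 1 then
          p ++ [PySem.List.pyGetD p (i - 1) 0]
        else
          p ++ [PySem.List.pyGetD p (i - 1) 0 + PySem.List.pyGetD A i 0])
      [PySem.List.pyGetD A 0 0]
    = runsum 0 ((maskedOf A).take (k + 1)) := by
  induction k with
  | zero =>
    rw [PySem.List.pyRange_one_eq_nil (by omega)]
    simp [maskedOf, runsum]
  | succ k ih =>
    have hk' : k < A.length := by omega
    have hlen : (maskedOf A).length = A.length := length_maskedOf A h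
    -- split the range at its last element k+1
    have hsplit : PySem.List.pyRange 1 (((k + 1 : Nat) : Int) + 1) 1
        = PySem.List.pyRange 1 ((k : Int) + 1) 1 ++ [((k : Int) + 1)] := by
      have := PySem.List.pyRange_one_succ_right (a := 1) (b := (k : Int) + 1) (by omega)
      push_cast
      simpa using this
    rw [hsplit, List.foldl_append, ih hk']
    have hlt : k + 1 < (maskedOf A).length := by omega
    have htk : (maskedOf A).take (k + 1 + 1)
        = (maskedOf A).take (k + 1) ++ [(maskedOf A)[k + 1]] := by
      rw [List.take_add_one]
      simp [List.getElem?_eq_getElem hlt]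
    have hlentake : ((maskedOf A).take (k + 1)).length = k + 1 := by
      simp [hlen]; omega
    have hidx : ((k : Int) + 1) - 1 = ((k : Nat) : Int) := by ring
    have hlast : PySem.List.pyGetD (runsum 0 ((maskedOf A).take (k + 1))) (((k : Int) + 1) - 1) 0
        = 0 + ((maskedOf A).take (k + 1)).sum := by
      rw [hidx, PySem.List.pyGetD_natCast]
      exact runsum_getD_last _ 0 k hlentake
    have hm : (maskedOf A)[k + 1]'hlt
        = (if PySem.Int.mod ((k : Int) + 1) 2 == 0 then PySem.List.pyGetD A ((k : Int) + 1) 0 else 0) := by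
      have hk2 : k < (PySem.List.pyRange 1 ((A.length : Nat) : Int) 1).length := by
        rw [PySem.List.length_pyRange_one]; omega
      simp only [maskedOf, List.singleton_append, List.getElem_cons_succ, List.getElem_map]
      rw [PySem.List.getElem_pyRange_one]
      ring_nf
    simp only [List.foldl_cons, List.foldl_nil]
    rw [htk, runsum_snoc]
    rcases Nat.even_or_odd k with hpar | hpar
    · -- k even, index k+1 odd: A appends p[-1]; mask there is 0
      obtain ⟨m, rfl⟩ := hpar
      have hc1 : PySem.Int.mod (((m + m : Nat) : Int) + 1) 2 = 1 := by
        simp [PySem.Int.mod, Int.fmod_eq_emod]; omega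
      simp only [hc1, hlast, hm]
      norm_num
    · -- k odd, index k+1 even: A appends p[-1] + A[k+1]; mask keeps A[k+1]
      obtain ⟨m, rfl⟩ := hpar
      have hc1 : PySem.Int.mod (((2 * m + 1 : Nat) : Int) + 1) 2 = 0 := by
        simp [PySem.Int.mod, Int.fmod_eq_emod]; omega
      simp only [hc1, hlast, hm]
      norm_num

-- ===== VERDICT (by name: the statement is the Claim_ definition above) =====
theorem prefix_array_of_even_indices_spec : Claim_equal_prefix_array_of_even_indices := by
  intro A _ hPre
  unfold Spec_prefix_array_of_even_indices
  rw [alt_eq_runsum]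
  have hn : 1 ≤ A.length := List.length_pos_iff.mpr hPre
  have hmask : (maskedOf A).take (A.length - 1 + 1) = maskedOf A := by
    apply List.take_of_length_le
    rw [length_maskedOf A hPre]; omega
  have hcast : ((A.length : Nat) : Int) = ((A.length - 1 : Nat) : Int) + 1 := by omega
  unfold prefix_array_of_even_indices
  rw [hcast, loop_inv A hPre (A.length - 1) (by omega), hmask]
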